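-- pv_equiv track=rewrite | github.com/adsabs/export_service | service/formatter/customFormat.py | __getAffiliationList
-- ===== SOURCE A (Python) =====
-- from itertools import product
-- from string import ascii_uppercase
--
-- def __getAffiliationList(aDoc):
--     if ('aff') in aDoc:
--         counter = [''.join(i) for i in product(ascii_uppercase, repeat=2)]
--         separator = '; '
--         affiliationList = ''
--         for affiliation, i in zip(aDoc['aff'], range(len(aDoc['aff']))):
--             affiliationList += counter[i] + '(' + affiliation + ')' + separator
--         # do not need the last separator
--         if (len(affiliationList) > len(separator)):
--             affiliationList = affiliationList[:-len(separator)]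
--         return affiliationList
--     return ''
-- ===== SOURCE B (Python) =====
-- # B: structural recursion carrying a two-character odometer label state ('A','A' ->
-- # 'A','B' -> ... -> 'B','A' ...), placing '; ' between the current piece and the
-- # recursive rest -- no label table, no index arithmetic, no trailing-separator strip.
-- def __getAffiliationList(aDoc):
--     if 'aff' not in aDoc:
--         return ''
--     def rec(affs, hi, lo):
--         if not affs:
--             return ''
--         piece = hi + lo + '(' + affs[0] + ')'
--         rest = affs[1:]
--         if not rest:
--             return piece
--         if lo == 'Z':
--             return piece + '; ' + rec(rest, chr(ord(hi) + 1), 'A')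
--         return piece + '; ' + rec(rest, hi, chr(ord(lo) + 1))
--     return rec(aDoc['aff'], 'A', 'A')
-- ===== Notes on version B (the rewrite author's own statement) =====
-- stated objective: alternative
-- what changed: B drops A's precomputed 676-entry product table, index loop, accumulator string and trailing-separator strip: it recurses over the affiliation list carrying a two-character odometer label state ('A','A' then 'A','B' ...; incrementing chr(ord(c)+1) with carry at 'Z') and places '; ' between the current piece and the recursive rest; Pre_ only excludes affiliation lists longer than 676, where A raises IndexError.
import Mathlib
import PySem

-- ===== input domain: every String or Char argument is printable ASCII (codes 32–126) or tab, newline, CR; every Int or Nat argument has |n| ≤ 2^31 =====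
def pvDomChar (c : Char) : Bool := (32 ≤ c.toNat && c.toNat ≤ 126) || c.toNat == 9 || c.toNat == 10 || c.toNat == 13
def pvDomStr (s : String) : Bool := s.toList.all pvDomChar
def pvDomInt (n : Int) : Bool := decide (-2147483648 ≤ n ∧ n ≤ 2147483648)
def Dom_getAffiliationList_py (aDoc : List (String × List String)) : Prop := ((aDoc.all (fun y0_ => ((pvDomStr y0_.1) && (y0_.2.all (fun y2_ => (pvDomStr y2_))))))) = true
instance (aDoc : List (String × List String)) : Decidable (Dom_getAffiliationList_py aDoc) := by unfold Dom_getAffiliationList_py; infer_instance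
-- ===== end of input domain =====

-- B replaces A's precomputed 676-entry label table, index loop, accumulator string and
-- trailing-separator strip by a structural recursion carrying a two-character odometer
-- label state, inserting '; ' between recursive pieces (alternative decomposition).

-- ===== PORT A =====
-- ascii_uppercase
def pvLetters : List Char := "ABCDEFGHIJKLMNOPQRSTUVWXYZ".toList

-- counter = [''.join(i) for i in product(ascii_uppercase, repeat=2)]
def pvCounter : List (List Char) := pvLetters.flatMap (fun a => pvLetters.map (fun b => [a, b]))

def getAffiliationList_py (aDoc : List (String × List String)) : String :=
  match aDoc.find? (fun kv => kv.1 == "aff") with   -- if 'aff' in aDoc / aDoc['aff'] (first match)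
  | some kv =>
      let separator : List Char := "; ".toList
      let aff := kv.2
      -- for affiliation, i in zip(aDoc['aff'], range(len(aDoc['aff']))): affiliationList += counter[i] + '(' + affiliation + ')' + separator
      -- (counter[i] via pyGetD: inside Pre_ the index is in range; Python raises IndexError beyond it)
      let affiliationList : List Char :=
        (aff.zip (PySem.List.pyRange 0 (aff.length : Int) 1)).foldl
          (fun acc p =>
            acc ++ PySem.List.pyGetD pvCounter p.2 [] ++ '(' :: p.1.toList ++ [')'] ++ separator) []
      -- if len(affiliationList) > len(separator): affiliationList = affiliationList[:-len(separator)]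
      let affiliationList :=
        if separator.length < affiliationList.length then
          PySem.List.slice affiliationList none (some (-(separator.length : Int)))
        else affiliationList
      String.ofList affiliationList
  | none => ""

-- ===== PORT B =====
-- def rec(affs, hi, lo): … (B's inner recursion, carrying the odometer label pair)
def pvRecAff : List String → Char → Char → List Char
  | [], _, _ => []                                    -- if not affs: return ''
  | [a], hi, lo => hi :: lo :: '(' :: a.toList ++ [')']   -- if not rest: return piece
  | a :: b :: rest, hi, lo =>
      (hi :: lo :: '(' :: a.toList ++ [')']) ++ "; ".toList ++
        (if lo == 'Z' then pvRecAff (b :: rest) (Char.ofNat (hi.toNat + 1)) 'A'   -- chr(ord(hi)+1)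
         else pvRecAff (b :: rest) hi (Char.ofNat (lo.toNat + 1)))                -- chr(ord(lo)+1)

def getAffiliationList_py_alt (aDoc : List (String × List String)) : String :=
  match aDoc.find? (fun kv => kv.1 == "aff") with
  | none => ""
  | some kv => String.ofList (pvRecAff kv.2 'A' 'A')

-- ===== PRECONDITION & SPEC =====
-- Pre_ excludes only affiliation lists longer than 676, where A raises IndexError (counter[i] out of range).
def Pre_getAffiliationList_py (aDoc : List (String × List String)) : Prop :=
  (aDoc.find? (fun kv => kv.1 == "aff")).all (fun kv => kv.2.length ≤ 676) = true
instance (aDoc : List (String × List String)) : Decidable (Pre_getAffiliationList_py aDoc) := by unfold Pre_getAffiliationList_py; infer_instance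

def pvWitness_getAffiliationList_py : (List (String × List String)) := [("aff", ["Harvard", "CfA"])]

def Spec_getAffiliationList_py (aDoc : List (String × List String)) (out : String) : Prop := out = getAffiliationList_py_alt aDoc
instance (aDoc : List (String × List String)) (out : String) : Decidable (Spec_getAffiliationList_py aDoc out) := by unfold Spec_getAffiliationList_py; infer_instance

-- ===== CLAIM (what is proved, stated in full; the proofs are below) =====
def Claim_equal_getAffiliationList_py : Prop := ∀ (aDoc : List (String × List String)), Dom_getAffiliationList_py aDoc → Pre_getAffiliationList_py aDoc → Spec_getAffiliationList_py aDoc (getAffiliationList_py aDoc)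

-- ===== LEMMAS AND PROOFS =====

-- proof-side vocabulary: the i-th label letterwise, the per-item piece, the staged piece list
def pvLetterAt (n : Nat) : Char := pvLetters.getD n 'A'

def pvPiece (i : Nat) (aff : String) : List Char :=
  pvLetterAt (i / 26) :: pvLetterAt (i % 26) :: '(' :: aff.toList ++ [')']

def pvPieces : List String → Nat → List (List Char)
  | [], _ => []
  | a :: t, s => pvPiece s a :: pvPieces t (s + 1)

-- A's table lookup at i equals the letterwise label, for every in-range index.
set_option maxRecDepth 10000 in
lemma counter_eq_letters : ∀ i : Fin 676, PySem.List.pyGetD pvCounter ((i : Nat) : Int) [] =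
    [pvLetterAt ((i : Nat) / 26), pvLetterAt ((i : Nat) % 26)] := by decide

-- incrementing a letter below 'Z'
lemma succ_letter : ∀ k : Fin 25, Char.ofNat ((pvLetterAt (k : Nat)).toNat + 1) = pvLetterAt ((k : Nat) + 1) := by decide

lemma letter_ne_Z : ∀ k : Fin 25, (pvLetterAt (k : Nat) == 'Z') = false := by decide

-- A's loop body accumulates exactly the pieces, each followed by the separator.
lemma loop_eq_pieces (aff : List String) : ∀ (s : Nat) (acc : List Char), s + aff.length ≤ 676 →
    (aff.zip (PySem.List.pyRange (s : Int) ((s : Int) + (aff.length : Int)) 1)).foldl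
      (fun acc p =>
        acc ++ PySem.List.pyGetD pvCounter p.2 [] ++ '(' :: p.1.toList ++ [')'] ++ "; ".toList) acc
    = acc ++ ((pvPieces aff s).map (fun q => q ++ "; ".toList)).flatten := by
  induction aff with
  | nil => intro s acc _; simp [pvPieces]
  | cons a t ih =>
      intro s acc h
      have hlt : (s : Int) < (s : Int) + ((a :: t).length : Int) := by
        simp only [List.length_cons]; push_cast; omega
      rw [PySem.List.pyRange_one_cons hlt]
      simp only [List.zip_cons_cons, List.foldl_cons, pvPieces, List.map_cons, List.flatten_cons]
      have hs : (s : Int) + ((a :: t).length : Int) = ((s + 1 : Nat) : Int) + (t.length : Int) := by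
        simp only [List.length_cons]; push_cast; omega
      have hcast : (s : Int) + 1 = ((s + 1 : Nat) : Int) := by push_cast; omega
      rw [hs, hcast, ih (s + 1) _ (by simp only [List.length_cons] at h; omega)]
      rw [counter_eq_letters ⟨s, by simp only [List.length_cons] at h; omega⟩]
      simp [pvPiece, List.append_assoc]

-- B's recursion from the odometer state of index s produces the join of the pieces from s.
lemma rec_eq_pieces (aff : List String) : ∀ s : Nat, s + aff.length ≤ 676 →
    pvRecAff aff (pvLetterAt (s / 26)) (pvLetterAt (s % 26)) =
      PySem.Chars.join "; ".toList (pvPieces aff s) := by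
  induction aff with
  | nil => intro s _; simp [pvRecAff, pvPieces, PySem.Chars.join_nil]
  | cons a t ih =>
      intro s h
      cases t with
      | nil => simp [pvRecAff, pvPieces, pvPiece, PySem.Chars.join_singleton]
      | cons b u =>
          have hs674 : s ≤ 674 := by simp only [List.length_cons] at h; omega
          simp only [pvRecAff, pvPieces, PySem.Chars.join_cons_cons]
          by_cases h25 : s % 26 = 25
          · have hq : s / 26 < 25 := by omega
            rw [h25, show (pvLetterAt 25 == 'Z') = true from by decide, if_pos rfl]
            rw [succ_letter ⟨s / 26, hq⟩]
            have h1 : s / 26 + 1 = (s + 1) / 26 := by omega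
            have h2 : (0 : Nat) = (s + 1) % 26 := by omega
            rw [h1, show ('A' : Char) = pvLetterAt ((s + 1) % 26) from by rw [← h2]; rfl]
            rw [ih (s + 1) (by simp only [List.length_cons] at h ⊢; omega)]
            simp [pvPieces, pvPiece, h25, List.append_assoc]
          · have hm : s % 26 < 25 := by omega
            rw [letter_ne_Z ⟨s % 26, hm⟩, if_neg (by simp)]
            rw [succ_letter ⟨s % 26, hm⟩]
            have h1 : s / 26 = (s + 1) / 26 := by omega
            have h2 : s % 26 + 1 = (s + 1) % 26 := by omega
            rw [h2, h1, ih (s + 1) (by simp only [List.length_cons] at h ⊢; omega)]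
            simp [pvPieces, pvPiece, ← h1, List.append_assoc]

-- flatten of pieces-with-separator is join-with-separator plus one trailing separator.
lemma flatten_pieces_eq_join (sep : List Char) (ps : List (List Char)) (hps : ps ≠ []) :
    (ps.map (fun q => q ++ sep)).flatten = PySem.Chars.join sep ps ++ sep := by
  induction ps with
  | nil => exact absurd rfl hps
  | cons q t ih =>
      cases t with
      | nil => simp [PySem.Chars.join_singleton]
      | cons r u =>
          simp only [List.map_cons, List.flatten_cons] at ih ⊢
          rw [ih (by simp), PySem.Chars.join_cons_cons]
          simp [List.append_assoc]

-- every piece has length ≥ 4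
lemma pvPiece_len (i : Nat) (aff : String) : 4 ≤ (pvPiece i aff).length := by
  simp [pvPiece]

-- ===== VERDICT (by name: the statement is the Claim_ definition above) =====
theorem getAffiliationList_py_spec : Claim_equal_getAffiliationList_py := by
  intro aDoc _ hpre
  unfold Spec_getAffiliationList_py getAffiliationList_py getAffiliationList_py_alt
  unfold Pre_getAffiliationList_py at hpre
  cases hfind : aDoc.find? (fun kv => kv.1 == "aff") with
  | none => rfl
  | some kv =>
      rw [hfind] at hpre
      simp only [Option.all_some, decide_eq_true_eq] at hpre
      simp only
      have hloop := loop_eq_pieces kv.2 0 [] (by simpa using hpre)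
      simp only [Nat.cast_zero, Int.zero_add, List.nil_append] at hloop
      rw [hloop]
      have hrec := rec_eq_pieces kv.2 0 (by simpa using hpre)
      rw [show pvLetterAt (0 / 26) = 'A' from rfl] at hrec
      rw [hrec]
      cases haff : kv.2 with
      | nil => simp [pvPieces, PySem.Chars.join_nil]
      | cons a t =>
          set ps := pvPieces (a :: t) 0 with hpsdef
          have hps : ps ≠ [] := by simp [hpsdef, pvPieces]
          rw [flatten_pieces_eq_join _ ps hps]
          have hlen : ("; ".toList).length < (PySem.Chars.join "; ".toList ps ++ "; ".toList).length := by
            have h4 : 4 ≤ (pvPiece 0 a).length := pvPiece_len 0 a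
            have hj : (pvPiece 0 a).length ≤ (PySem.Chars.join "; ".toList ps).length := by
              rw [hpsdef]; unfold pvPieces
              cases hu : pvPieces t 1 with
              | nil => simp [PySem.Chars.join_singleton]
              | cons r v => rw [PySem.Chars.join_cons_cons]; simp
            simp only [List.length_append]
            omega
          rw [if_pos hlen]
          rw [show (-((("; ".toList).length : Nat) : Int)) = (-2 : Int) by decide]
          rw [PySem.List.slice_to_neg_ofNat _ 2 (by omega)]
          have h2 : (PySem.Chars.join "; ".toList ps ++ "; ".toList).length - 2
              = (PySem.Chars.join "; ".toList ps).length := by simp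
          rw [h2, List.take_left]
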